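-- pv_equiv track=rewrite | github.com/nickfitnesscoach-ctrl/2025-09-01_Kbju_bot- | app/drip_followups.py | _candidate_text_keys
-- ===== SOURCE A (Python) =====
-- from typing import List, Tuple
--
-- def _candidate_text_keys(stage_to_set: int, gender: str | None) -> List[str]:
--     base = {
--         1: "drip.case_24h",
--         2: "drip.case_48h",
--         3: "drip.case_72h",
--     }.get(stage_to_set)
--     if not base:
--         return []
--
--     gender_normalized = (gender or "").strip().lower()
--     keys: list[str] = []
--
--     if stage_to_set == 3:
--         keys.append(f"{base}.any.text")
--     else:
--         if gender_normalized == "male":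
--             keys.append(f"{base}.male.text")
--         elif gender_normalized == "female":
--             keys.append(f"{base}.female.text")
--         else:
--             keys.append(f"{base}.any.text")
--
--         for fallback in (f"{base}.any.text", f"{base}.male.text", f"{base}.female.text"):
--             if fallback not in keys:
--                 keys.append(fallback)
--
--     return keys
-- ===== SOURCE B (Python) =====
-- def _candidate_text_keys(stage_to_set, gender):
--     base = {
--         1: "drip.case_24h",
--         2: "drip.case_48h",
--         3: "drip.case_72h",
--     }.get(stage_to_set)
--     if not base:
--         return []
--     if stage_to_set == 3:
--         return [f"{base}.any.text"]
--     g = (gender or "").strip().lower()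
--     order = {
--         "male": ("male", "any", "female"),
--         "female": ("female", "any", "male"),
--     }.get(g, ("any", "male", "female"))
--     return [f"{base}.{s}.text" for s in order]
-- ===== Notes on version B (the rewrite author's own statement) =====
-- stated objective: simpler
-- what changed: Replaces the conditional-append plus membership-checking dedup loop with a precomputed gender->suffix-priority table and a single comprehension over that order.
import Mathlib
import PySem

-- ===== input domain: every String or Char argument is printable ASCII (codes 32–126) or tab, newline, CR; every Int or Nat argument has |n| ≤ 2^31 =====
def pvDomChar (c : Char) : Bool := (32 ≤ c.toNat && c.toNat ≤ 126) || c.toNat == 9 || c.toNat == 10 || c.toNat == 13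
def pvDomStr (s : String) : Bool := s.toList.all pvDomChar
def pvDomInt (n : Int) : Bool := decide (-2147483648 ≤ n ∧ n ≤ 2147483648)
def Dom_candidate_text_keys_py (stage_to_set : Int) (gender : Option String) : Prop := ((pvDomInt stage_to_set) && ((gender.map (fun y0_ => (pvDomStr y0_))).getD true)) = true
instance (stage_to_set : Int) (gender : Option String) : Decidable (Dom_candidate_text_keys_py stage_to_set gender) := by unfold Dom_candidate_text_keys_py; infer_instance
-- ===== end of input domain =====

-- B replaces A's conditional-append + membership dedup loop with a static gender->suffix-order table and one map (simpler).


-- ===== PORT A =====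
-- {1: …, 2: …, 3: …}.get(stage_to_set)
def pvBaseDict : PySem.Dict Int String :=
  ((PySem.Dict.empty.insert 1 "drip.case_24h").insert 2 "drip.case_48h").insert 3 "drip.case_72h"

def candidate_text_keys_py (stage_to_set : Int) (gender : Option String) : List String :=
  match pvBaseDict.get? stage_to_set with
  | none => []  -- 'if not base: return []' (all dict values are non-empty, so falsy ↔ missing)
  | some base =>
    -- gender_normalized = (gender or "").strip().lower(); 'gender or ""' = getD "" (some "" is falsy, yielding "" either way)
    let gender_normalized := PySem.Str.lower (PySem.Str.strip (gender.getD ""))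
    if stage_to_set == 3 then
      [base ++ ".any.text"]
    else
      let keys :=
        if gender_normalized == "male" then [base ++ ".male.text"]
        else if gender_normalized == "female" then [base ++ ".female.text"]
        else [base ++ ".any.text"]
      -- for fallback in (…): if fallback not in keys: keys.append(fallback)
      [base ++ ".any.text", base ++ ".male.text", base ++ ".female.text"].foldl
        (fun ks fb => if ks.contains fb then ks else ks ++ [fb]) keys

-- ===== PORT B =====
def candidate_text_keys_py_alt (stage_to_set : Int) (gender : Option String) : List String :=
  match pvBaseDict.get? stage_to_set with
  | none => []
  | some base =>
    if stage_to_set == 3 then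
      [base ++ ".any.text"]
    else
      let g := PySem.Str.lower (PySem.Str.strip (gender.getD ""))
      -- {"male": …, "female": …}.get(g, ("any","male","female"))
      let order :=
        (((PySem.Dict.empty.insert "male" ["male", "any", "female"]).insert
            "female" ["female", "any", "male"]).get? g).getD ["any", "male", "female"]
      order.map (fun s => base ++ "." ++ s ++ ".text")

-- ===== PRECONDITION & SPEC =====
def Spec_candidate_text_keys_py (stage_to_set : Int) (gender : Option String) (out : List String) : Prop := out = candidate_text_keys_py_alt stage_to_set gender
instance (stage_to_set : Int) (gender : Option String) (out : List String) : Decidable (Spec_candidate_text_keys_py stage_to_set gender out) := by unfold Spec_candidate_text_keys_py; infer_instance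

-- ===== CLAIM (what is proved, stated in full; the proofs are below) =====
def Claim_equal_candidate_text_keys_py : Prop := ∀ (stage_to_set : Int) (gender : Option String), Dom_candidate_text_keys_py stage_to_set gender → Spec_candidate_text_keys_py stage_to_set gender (candidate_text_keys_py stage_to_set gender)

-- ===== LEMMAS AND PROOFS =====

-- A's dict lookup misses every key other than 1, 2, 3.
theorem pv_base_none (s : Int) (h1 : ¬ s = 1) (h2 : ¬ s = 2) (h3 : ¬ s = 3) :
    pvBaseDict.get? s = none := by
  simp [pvBaseDict, PySem.Dict.insert, PySem.Dict.empty, PySem.Dict.get?,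
        Ne.symm h1, Ne.symm h2, Ne.symm h3]

-- A's dedup loop over [a, m, f], started from each possible first key, yields the priority order.
theorem pv_fold_m (a m f : String) (h1 : a ≠ m) (h2 : a ≠ f) (h3 : m ≠ f) :
    List.foldl (fun ks fb => if ks.contains fb then ks else ks ++ [fb]) [m] [a, m, f] = [m, a, f] := by
  simp [List.foldl, h1, h2, h3, Ne.symm h1, Ne.symm h2, Ne.symm h3]

theorem pv_fold_f (a m f : String) (h1 : a ≠ m) (h2 : a ≠ f) (h3 : m ≠ f) :
    List.foldl (fun ks fb => if ks.contains fb then ks else ks ++ [fb]) [f] [a, m, f] = [f, a, m] := by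
  simp [List.foldl, h1, h2, h3, Ne.symm h1, Ne.symm h2, Ne.symm h3]

theorem pv_fold_a (a m f : String) (h1 : a ≠ m) (h2 : a ≠ f) (h3 : m ≠ f) :
    List.foldl (fun ks fb => if ks.contains fb then ks else ks ++ [fb]) [a] [a, m, f] = [a, m, f] := by
  simp [List.foldl, h1, h2, h3, Ne.symm h1, Ne.symm h2, Ne.symm h3]

-- B's f-string pieces collapse onto A's single-literal suffixes.
theorem pv_cat_any (base : String) : base ++ "." ++ "any" ++ ".text" = base ++ ".any.text" := by
  simp only [String.append_assoc]; congr 1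
theorem pv_cat_male (base : String) : base ++ "." ++ "male" ++ ".text" = base ++ ".male.text" := by
  simp only [String.append_assoc]; congr 1
theorem pv_cat_female (base : String) : base ++ "." ++ "female" ++ ".text" = base ++ ".female.text" := by
  simp only [String.append_assoc]; congr 1

-- the three suffixed keys built from the same base are pairwise distinct
theorem pv_ne_am (base : String) : base ++ ".any.text" ≠ base ++ ".male.text" := by
  intro h; have := congrArg String.toList h; simp at this
theorem pv_ne_af (base : String) : base ++ ".any.text" ≠ base ++ ".female.text" := by
  intro h; have := congrArg String.toList h; simp at this
theorem pv_ne_mf (base : String) : base ++ ".male.text" ≠ base ++ ".female.text" := by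
  intro h; have := congrArg String.toList h; simp at this

-- the stage-1/2 body: A's conditional append + dedup loop equals B's ordered map, for any base
theorem pv_stage12 (base : String) (g : String) :
    (List.foldl (fun ks fb => if ks.contains fb then ks else ks ++ [fb])
      (if g == "male" then [base ++ ".male.text"]
       else if g == "female" then [base ++ ".female.text"]
       else [base ++ ".any.text"])
      [base ++ ".any.text", base ++ ".male.text", base ++ ".female.text"]) =
    ((((PySem.Dict.empty.insert "male" ["male", "any", "female"]).insert
        "female" ["female", "any", "male"]).get? g).getD ["any", "male", "female"]).map
      (fun s => base ++ "." ++ s ++ ".text") := by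
  by_cases hm : g = "male"
  · subst hm
    have hd : ((((PySem.Dict.empty.insert "male" ["male", "any", "female"]).insert
        "female" ["female", "any", "male"]).get? "male").getD (["any", "male", "female"] : List String))
        = ["male", "any", "female"] := by decide
    rw [hd]
    simp only [List.map, pv_cat_any, pv_cat_male, pv_cat_female, show ("male" == "male") = true from rfl, if_true]
    exact pv_fold_m _ _ _ (pv_ne_am base) (pv_ne_af base) (pv_ne_mf base)
  · by_cases hf : g = "female"
    · subst hf
      have hd : ((((PySem.Dict.empty.insert "male" ["male", "any", "female"]).insert
          "female" ["female", "any", "male"]).get? "female").getD (["any", "male", "female"] : List String))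
          = ["female", "any", "male"] := by decide
      rw [hd]
      simp only [List.map, pv_cat_any, pv_cat_male, pv_cat_female,
        show ("female" == "male") = false from rfl, show ("female" == "female") = true from rfl,
        if_true, if_false, Bool.false_eq_true]
      exact pv_fold_f _ _ _ (pv_ne_am base) (pv_ne_af base) (pv_ne_mf base)
    · have hd : ((((PySem.Dict.empty.insert "male" ["male", "any", "female"]).insert
          "female" ["female", "any", "male"]).get? g).getD (["any", "male", "female"] : List String))
          = ["any", "male", "female"] := by
        simp [PySem.Dict.insert, PySem.Dict.empty, PySem.Dict.get?, Ne.symm hm, Ne.symm hf]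
      rw [hd]
      have hm' : (g == "male") = false := by simp [hm]
      have hf' : (g == "female") = false := by simp [hf]
      simp only [List.map, pv_cat_any, pv_cat_male, pv_cat_female, hm', hf', if_false, Bool.false_eq_true]
      exact pv_fold_a _ _ _ (pv_ne_am base) (pv_ne_af base) (pv_ne_mf base)

theorem pv_body_eq (stage_to_set : Int) (gender : Option String) :
    candidate_text_keys_py stage_to_set gender = candidate_text_keys_py_alt stage_to_set gender := by
  unfold candidate_text_keys_py candidate_text_keys_py_alt
  by_cases h1 : stage_to_set = 1
  · subst h1
    rw [show pvBaseDict.get? 1 = some "drip.case_24h" from by decide]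
    simp only [show ((1 : Int) == 3) = false from rfl, if_false, Bool.false_eq_true]
    exact pv_stage12 _ _
  · by_cases h2 : stage_to_set = 2
    · subst h2
      rw [show pvBaseDict.get? 2 = some "drip.case_48h" from by decide]
      simp only [show ((2 : Int) == 3) = false from rfl, if_false, Bool.false_eq_true]
      exact pv_stage12 _ _
    · by_cases h3 : stage_to_set = 3
      · subst h3
        rw [show pvBaseDict.get? 3 = some "drip.case_72h" from by decide]
        simp only [show ((3 : Int) == 3) = true from rfl, if_true]
      · rw [pv_base_none _ h1 h2 h3]

-- ===== VERDICT (by name: the statement is the Claim_ definition above) =====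
theorem candidate_text_keys_py_spec : Claim_equal_candidate_text_keys_py := by
  intro s g _
  exact pv_body_eq s g
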